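-- pv_equiv track=rewrite | github.com/meezlung/git-test | lab02/lab02d copy.py | dfs
-- ===== SOURCE A (Python) =====
-- from collections import defaultdict
--
-- def dfs(graph: defaultdict[int, list[int]], u: int, goal: int, visited: set[int], allow_trees: bool, rev_idx: dict[int, tuple[int, int]], grid: list[list[str]]):
--     if u == goal:
--         return True
--
--     visited.add(u)
--
--     for v in graph[u]:
--         if v not in visited:
--             i, j = rev_idx[v]
--             if not allow_trees and grid[i][j] == 'T':
--                 continue # skip trees
--             if dfs(graph, v, goal, visited, allow_trees, rev_idx, grid):
--                 return True
--
--     return False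
-- ===== SOURCE B (Python) =====
-- def dfs(graph, u, goal, visited, allow_trees, rev_idx, grid):
--     if u == goal:
--         return True
--     visited.add(u)
--     stack = [iter(graph[u])]
--     while stack:
--         descended = False
--         for v in stack[-1]:
--             if v in visited:
--                 continue
--             i, j = rev_idx[v]
--             if not allow_trees and grid[i][j] == 'T':
--                 continue  # skip trees
--             if v == goal:
--                 return True
--             visited.add(v)
--             stack.append(iter(graph[v]))
--             descended = True
--             break
--         if not descended:
--             stack.pop()
--     return False
-- ===== Notes on version B (the rewrite author's own statement) =====
-- stated objective: alternative
-- what changed: The recursive DFS is re-decomposed as an explicit iterative stack machine: a while-loop over a stack of per-node neighbour iterators that simulates the call stack, with the goal test hoisted before descending instead of at the callee's head.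
-- outside the precondition, e.g. on dfs({0: [1], 2: [3]}, 0, 1, set(), True, {1: (0, 0)}, [['x']]): A returns True, B returns True; on dfs({0: [1, 5]}, 0, 1, set(), True, {1: (0, 0)}, [['x']]): A returns True, B returns True
import Mathlib
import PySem

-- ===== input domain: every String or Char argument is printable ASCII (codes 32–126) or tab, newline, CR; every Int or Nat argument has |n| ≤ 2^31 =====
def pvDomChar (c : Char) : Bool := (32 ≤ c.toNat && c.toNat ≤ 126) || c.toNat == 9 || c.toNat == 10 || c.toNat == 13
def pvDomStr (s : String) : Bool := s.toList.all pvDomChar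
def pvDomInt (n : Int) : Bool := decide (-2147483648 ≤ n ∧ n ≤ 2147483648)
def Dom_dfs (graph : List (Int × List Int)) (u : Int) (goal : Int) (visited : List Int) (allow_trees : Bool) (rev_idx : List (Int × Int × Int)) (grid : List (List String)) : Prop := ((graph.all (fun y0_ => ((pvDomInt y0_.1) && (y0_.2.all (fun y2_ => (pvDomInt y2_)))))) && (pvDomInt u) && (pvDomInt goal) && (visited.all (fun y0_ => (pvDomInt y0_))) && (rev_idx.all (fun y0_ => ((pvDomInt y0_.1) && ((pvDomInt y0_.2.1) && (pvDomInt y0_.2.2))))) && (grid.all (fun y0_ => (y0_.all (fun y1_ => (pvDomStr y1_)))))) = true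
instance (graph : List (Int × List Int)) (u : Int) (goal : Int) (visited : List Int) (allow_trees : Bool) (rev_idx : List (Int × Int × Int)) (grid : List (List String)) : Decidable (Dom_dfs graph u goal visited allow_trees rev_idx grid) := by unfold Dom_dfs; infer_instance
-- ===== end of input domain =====

-- B replaces A's recursive DFS by an explicit iterative stack machine (same traversal, different
-- decomposition: recursion ↔ stack of per-node neighbour iterators); equivalence is about the RETURN
-- value only — both Pythons mutate `visited` (and the defaultdict `graph`) identically in place.

-- Shared small helpers (pure expressions of the Python source, used by both ports):
-- graph[u] where graph is a defaultdict(list): a missing key yields [] (never raises)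
def pvNbrs (graph : List (Int × List Int)) (u : Int) : List Int :=
  (PySem.Dict.ofList graph).getD u []

-- `i, j = rev_idx[v]; not allow_trees and grid[i][j] == 'T'` — none = Python raises
-- (KeyError on rev_idx, or IndexError on grid), which Pre_dfs excludes.
def pvSkip? (allow_trees : Bool) (rev_idx : List (Int × Int × Int)) (grid : List (List String)) (v : Int) : Option Bool :=
  ((PySem.Dict.ofList rev_idx).get? v).bind (fun ij =>
    ((PySem.List.pyGet? grid ij.1).bind (fun row => PySem.List.pyGet? row ij.2)).map
      (fun cell => !allow_trees && cell == "T"))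

-- Depth bound of the recursion: every node entered below the top one is an adjacency-list element
-- and is fresh (not yet visited), so the depth never exceeds this fuel (a totality guard only).
def pvFuel (graph : List (Int × List Int)) : Nat := (graph.flatMap Prod.snd).length + 1

-- every value of the built dict is one of the listed adjacency lists
lemma pvValues_foldl_insert_sub (w : List Int) (l : List (Int × List Int)) (d : PySem.Dict Int (List Int)) :
    w ∈ (l.foldl (fun acc p => acc.insert p.1 p.2) d).values → w ∈ d.values ∨ w ∈ l.map Prod.snd := by
  induction l generalizing d with
  | nil => intro h; exact Or.inl h
  | cons p rest ih =>
    intro h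
    rcases ih (d.insert p.1 p.2) h with h' | h'
    · rcases PySem.Dict.mem_values_insert d p.1 p.2 w h' with h'' | h''
      · right; simp [h'']
      · left; exact h''
    · right; simp [h']

-- an adjacency list is never longer than the concatenation of all adjacency lists
lemma pvNbrs_length_le (graph : List (Int × List Int)) (v : Int) :
    (pvNbrs graph v).length ≤ (graph.flatMap Prod.snd).length := by
  unfold pvNbrs
  rw [PySem.Dict.getD_eq_get?_getD]
  cases hg : (PySem.Dict.ofList graph).get? v with
  | none => simp
  | some w =>
    have hi := PySem.Dict.mem_items_of_get?_eq_some _ hg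
    have hv : w ∈ (PySem.Dict.ofList graph).values := by
      simp only [PySem.Dict.values]
      exact List.mem_map.mpr ⟨(v, w), hi, rfl⟩
    have hmem : w ∈ graph.map Prod.snd := by
      rcases pvValues_foldl_insert_sub w graph PySem.Dict.empty hv with h | h
      · simp [PySem.Dict.values, PySem.Dict.empty] at h
      · exact h
    simp only [Option.getD_some]
    clear hg hi hv
    induction graph with
    | nil => simp at hmem
    | cons p rest ih =>
      simp only [List.map_cons, List.mem_cons] at hmem
      simp only [List.flatMap_cons, List.length_append]
      rcases hmem with h | h
      · subst h; omega
      · have := ih h; omega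

-- ===== PORT A =====  (literal recursion of Source A; fuel only makes it total, see pvFuel)
mutual
def dfsVisit (graph : List (Int × List Int)) (goal : Int) (allow_trees : Bool)
    (rev_idx : List (Int × Int × Int)) (grid : List (List String))
    (f : Nat) (u : Int) (vis : PySem.Set Int) : Bool × PySem.Set Int :=
  if u == goal then (true, vis)
  else
    match f with
    | 0 => (false, vis)  -- fuel exhausted: unreachable with f = pvFuel (depth bound)
    | Nat.succ f' => dfsLoop graph goal allow_trees rev_idx grid f' (pvNbrs graph u) (vis.add u)
termination_by (f, 0)

def dfsLoop (graph : List (Int × List Int)) (goal : Int) (allow_trees : Bool)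
    (rev_idx : List (Int × Int × Int)) (grid : List (List String))
    (f : Nat) (ns : List Int) (vis : PySem.Set Int) : Bool × PySem.Set Int :=
  match ns with
  | [] => (false, vis)
  | v :: rest =>
    if vis.contains v then dfsLoop graph goal allow_trees rev_idx grid f rest vis
    else
      match pvSkip? allow_trees rev_idx grid v with
      | none => dfsLoop graph goal allow_trees rev_idx grid f rest vis  -- Python raises here; outside Pre_
      | some true => dfsLoop graph goal allow_trees rev_idx grid f rest vis  -- continue (skip trees)
      | some false =>
        match dfsVisit graph goal allow_trees rev_idx grid f v vis with
        | (true, vis') => (true, vis')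
        | (false, vis') => dfsLoop graph goal allow_trees rev_idx grid f rest vis'
termination_by (f, ns.length + 1)
end

def dfs (graph : List (Int × List Int)) (u : Int) (goal : Int) (visited : List Int) (allow_trees : Bool) (rev_idx : List (Int × Int × Int)) (grid : List (List String)) : Bool :=
  (dfsVisit graph goal allow_trees rev_idx grid (pvFuel graph) u (PySem.Set.ofList visited)).1

-- ===== PORT B =====  (Source B: explicit stack machine; each frame = (remaining neighbour iterator,
-- a per-frame copy of the fuel that makes the Lean definition total))
-- weight of a machine stack: the termination measure of the machine
def pvStackM (b : Nat) (S : List (List Int × Nat)) : Nat :=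
  S.foldr (fun p acc => b ^ p.2 * (p.1.length + 1) + acc) 0

lemma pvStackM_cons (b : Nat) (ns : List Int) (f : Nat) (S : List (List Int × Nat)) :
    pvStackM b ((ns, f) :: S) = b ^ f * (ns.length + 1) + pvStackM b S := rfl

lemma pvStackM_pop_lt (b : Nat) (hb : 0 < b) (f : Nat) (S : List (List Int × Nat)) :
    pvStackM b S < pvStackM b (([], f) :: S) := by
  have hp : 0 < b ^ f := pow_pos hb f
  simp only [pvStackM_cons, List.length_nil]
  linarith

lemma pvStackM_tail_lt (b : Nat) (hb : 0 < b) (f : Nat) (v : Int) (rest : List Int) (S : List (List Int × Nat)) :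
    pvStackM b ((rest, f) :: S) < pvStackM b ((v :: rest, f) :: S) := by
  have hp : 0 < b ^ f := pow_pos hb f
  simp only [pvStackM_cons, List.length_cons]
  have h1 : b ^ f * (rest.length + 1) < b ^ f * (rest.length + 1 + 1) :=
    mul_lt_mul_of_pos_left (by omega) hp
  linarith

lemma pvStackM_push_lt (b : Nat) (nsv : List Int) (hb : nsv.length + 1 < b)
    (f' : Nat) (v : Int) (rest : List Int) (S : List (List Int × Nat)) :
    pvStackM b ((nsv, f') :: (rest, Nat.succ f') :: S) < pvStackM b ((v :: rest, Nat.succ f') :: S) := by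
  have hp : 0 < b ^ f' := pow_pos (by omega) f'
  have h1 : b ^ f' * (nsv.length + 1) < b ^ (Nat.succ f') := by
    rw [pow_succ]
    exact mul_lt_mul_of_pos_left hb hp
  simp only [pvStackM_cons, List.length_cons]
  linarith

def dfsMachine (graph : List (Int × List Int)) (goal : Int) (allow_trees : Bool)
    (rev_idx : List (Int × Int × Int)) (grid : List (List String)) :
    List (List Int × Nat) → PySem.Set Int → Bool
  | [], _ => false
  | (ns, f) :: S, vis =>
    match ns with
    | [] => dfsMachine graph goal allow_trees rev_idx grid S vis  -- iterator exhausted: pop the frame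
    | v :: rest =>
      if vis.contains v then dfsMachine graph goal allow_trees rev_idx grid ((rest, f) :: S) vis
      else
        match pvSkip? allow_trees rev_idx grid v with
        | none => dfsMachine graph goal allow_trees rev_idx grid ((rest, f) :: S) vis  -- Python raises; outside Pre_
        | some true => dfsMachine graph goal allow_trees rev_idx grid ((rest, f) :: S) vis  -- skip trees
        | some false =>
          if v == goal then true
          else
            match f with
            | 0 => dfsMachine graph goal allow_trees rev_idx grid ((rest, 0) :: S) vis  -- fuel guard, unreachable
            | Nat.succ f' =>
              dfsMachine graph goal allow_trees rev_idx grid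
                ((pvNbrs graph v, f') :: (rest, Nat.succ f') :: S) (vis.add v)  -- descend: push a frame
termination_by S _ => pvStackM (pvFuel graph + 1) S
decreasing_by
  all_goals first
    | exact pvStackM_pop_lt _ (by omega) _ _
    | exact pvStackM_tail_lt _ (by omega) _ _ _ _
    | exact pvStackM_push_lt _ _ (by have := pvNbrs_length_le graph v; unfold pvFuel; omega) _ _ _ _

def dfs_alt (graph : List (Int × List Int)) (u : Int) (goal : Int) (visited : List Int) (allow_trees : Bool) (rev_idx : List (Int × Int × Int)) (grid : List (List String)) : Bool :=
  if u == goal then true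
  else
    dfsMachine graph goal allow_trees rev_idx grid
      [(pvNbrs graph u, (graph.flatMap Prod.snd).length)]
      ((PySem.Set.ofList visited).add u)

-- ===== PRECONDITION & SPEC =====
-- Pre_dfs excludes inputs on which the traversal raises.  Although `graph` is annotated
-- defaultdict, a caller passing a plain dict (as the differential harness does) gets a KeyError
-- from graph[u]/graph[v] on a missing key, and rev_idx[v] / grid[i][j] raise KeyError/IndexError;
-- so unless u == goal (A returns at once), u must be a key of graph and every listed neighbour
-- must be harmless — already visited or equal to u (never looked up), or with a rev_idx entry and
-- in-range grid coordinates and, unless skipped as a tree or equal to the goal, itself a key of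
-- graph.  This is a closed-form over-approximation: it also excludes a few inputs where the
-- offending neighbour is never reached and A still returns; B returns the same value there
-- (see the cites in the claim).
def Pre_dfs (graph : List (Int × List Int)) (u : Int) (goal : Int) (visited : List Int) (allow_trees : Bool) (rev_idx : List (Int × Int × Int)) (grid : List (List String)) : Prop :=
  u = goal ∨
    ((PySem.Dict.ofList graph).contains u = true ∧
      ∀ p ∈ graph, ∀ v ∈ p.2,
        v ∈ visited ∨ v = u ∨
          ((pvSkip? allow_trees rev_idx grid v).isSome ∧
            (pvSkip? allow_trees rev_idx grid v = some true ∨ v = goal ∨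
              (PySem.Dict.ofList graph).contains v = true)))
instance (graph : List (Int × List Int)) (u : Int) (goal : Int) (visited : List Int) (allow_trees : Bool) (rev_idx : List (Int × Int × Int)) (grid : List (List String)) : Decidable (Pre_dfs graph u goal visited allow_trees rev_idx grid) := by unfold Pre_dfs; infer_instance

def pvWitness_dfs : (List (Int × List Int)) × Int × Int × List Int × Bool × (List (Int × Int × Int)) × List (List String) :=
  ([(0, [1]), (1, [0, 2])], 0, 2, [], false, [(0, (0, 0)), (1, (0, 1)), (2, (0, 2))], [[".", ".", "T"]])

def Spec_dfs (graph : List (Int × List Int)) (u : Int) (goal : Int) (visited : List Int) (allow_trees : Bool) (rev_idx : List (Int × Int × Int)) (grid : List (List String)) (out : Bool) : Prop := out = dfs_alt graph u goal visited allow_trees rev_idx grid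
instance (graph : List (Int × List Int)) (u : Int) (goal : Int) (visited : List Int) (allow_trees : Bool) (rev_idx : List (Int × Int × Int)) (grid : List (List String)) (out : Bool) : Decidable (Spec_dfs graph u goal visited allow_trees rev_idx grid out) := by unfold Spec_dfs; infer_instance

-- ===== CLAIM (what is proved, stated in full; the proofs are below) =====
def Claim_equal_dfs : Prop := ∀ (graph : List (Int × List Int)) (u : Int) (goal : Int) (visited : List Int) (allow_trees : Bool) (rev_idx : List (Int × Int × Int)) (grid : List (List String)), Dom_dfs graph u goal visited allow_trees rev_idx grid → Pre_dfs graph u goal visited allow_trees rev_idx grid → Spec_dfs graph u goal visited allow_trees rev_idx grid (dfs graph u goal visited allow_trees rev_idx grid)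

-- ===== LEMMAS AND PROOFS =====

-- The bisimulation: running the machine on a stack with top frame (ns, f) is running A's neighbour
-- loop on ns with fuel f and, if it fails, continuing the machine on the rest of the stack with the
-- visited set the loop produced.
lemma machine_eq_loop (graph : List (Int × List Int)) (goal : Int) (allow_trees : Bool)
    (rev_idx : List (Int × Int × Int)) (grid : List (List String)) :
    ∀ (n : Nat) (f : Nat) (ns : List Int) (vis : PySem.Set Int) (S : List (List Int × Nat)),
      pvStackM (pvFuel graph + 1) ((ns, f) :: S) ≤ n →
      dfsMachine graph goal allow_trees rev_idx grid ((ns, f) :: S) vis =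
        (if (dfsLoop graph goal allow_trees rev_idx grid f ns vis).1 then true
         else dfsMachine graph goal allow_trees rev_idx grid S
                (dfsLoop graph goal allow_trees rev_idx grid f ns vis).2) := by
  intro n
  induction n with
  | zero =>
    intro f ns vis S h
    exfalso
    have hp : 0 < (pvFuel graph + 1) ^ f := pow_pos (by omega) f
    rw [pvStackM_cons] at h
    nlinarith
  | succ n ih =>
    intro f ns vis S h
    cases ns with
    | nil => simp [dfsMachine, dfsLoop]
    | cons v rest =>
      have hb : 0 < pvFuel graph + 1 := by omega
      have htail : pvStackM (pvFuel graph + 1) ((rest, f) :: S) ≤ n := by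
        have := pvStackM_tail_lt (pvFuel graph + 1) hb f v rest S
        omega
      by_cases hc : v ∈ vis
      · rw [show dfsMachine graph goal allow_trees rev_idx grid ((v :: rest, f) :: S) vis =
              dfsMachine graph goal allow_trees rev_idx grid ((rest, f) :: S) vis by
            rw [dfsMachine.eq_def]; simp [hc],
          show dfsLoop graph goal allow_trees rev_idx grid f (v :: rest) vis =
              dfsLoop graph goal allow_trees rev_idx grid f rest vis by
            rw [dfsLoop.eq_def]; simp [hc]]
        exact ih f rest vis S htail
      · cases hsk : pvSkip? allow_trees rev_idx grid v with
        | none =>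
          rw [show dfsMachine graph goal allow_trees rev_idx grid ((v :: rest, f) :: S) vis =
                dfsMachine graph goal allow_trees rev_idx grid ((rest, f) :: S) vis by
              rw [dfsMachine.eq_def]; simp [hc, hsk],
            show dfsLoop graph goal allow_trees rev_idx grid f (v :: rest) vis =
                dfsLoop graph goal allow_trees rev_idx grid f rest vis by
              rw [dfsLoop.eq_def]; simp [hc, hsk]]
          exact ih f rest vis S htail
        | some b =>
          cases b with
          | true =>
            rw [show dfsMachine graph goal allow_trees rev_idx grid ((v :: rest, f) :: S) vis =
                  dfsMachine graph goal allow_trees rev_idx grid ((rest, f) :: S) vis by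
                rw [dfsMachine.eq_def]; simp [hc, hsk],
              show dfsLoop graph goal allow_trees rev_idx grid f (v :: rest) vis =
                  dfsLoop graph goal allow_trees rev_idx grid f rest vis by
                rw [dfsLoop.eq_def]; simp [hc, hsk]]
            exact ih f rest vis S htail
          | false =>
            by_cases hg : (v == goal) = true
            · rw [show dfsMachine graph goal allow_trees rev_idx grid ((v :: rest, f) :: S) vis =
                    true by rw [dfsMachine.eq_def]; simp [hc, hsk, hg],
                show dfsLoop graph goal allow_trees rev_idx grid f (v :: rest) vis =
                    (true, vis) by
                  rw [dfsLoop.eq_def]; simp [hc, hsk]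
                  rw [dfsVisit.eq_def]; simp [hg]]
              simp
            · cases f with
              | zero =>
                rw [show dfsMachine graph goal allow_trees rev_idx grid ((v :: rest, 0) :: S) vis =
                      dfsMachine graph goal allow_trees rev_idx grid ((rest, 0) :: S) vis by
                    rw [dfsMachine.eq_def]; simp [hc, hsk, hg],
                  show dfsLoop graph goal allow_trees rev_idx grid 0 (v :: rest) vis =
                      dfsLoop graph goal allow_trees rev_idx grid 0 rest vis by
                    rw [dfsLoop.eq_def]; simp [hc, hsk]
                    rw [dfsVisit.eq_def]; simp [hg]]
                exact ih 0 rest vis S htail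
              | succ f' =>
                have hpush : pvStackM (pvFuel graph + 1)
                    ((pvNbrs graph v, f') :: (rest, f' + 1) :: S) ≤ n := by
                  have hlt := pvStackM_push_lt (pvFuel graph + 1) (pvNbrs graph v)
                    (by have := pvNbrs_length_le graph v; unfold pvFuel; omega) f' v rest S
                  simp only [Nat.succ_eq_add_one] at hlt h ⊢
                  omega
                rw [show dfsMachine graph goal allow_trees rev_idx grid ((v :: rest, f' + 1) :: S) vis =
                      dfsMachine graph goal allow_trees rev_idx grid
                        ((pvNbrs graph v, f') :: (rest, f' + 1) :: S) (vis.add v) by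
                    rw [dfsMachine.eq_def]; simp [hc, hsk, hg]]
                rw [ih f' (pvNbrs graph v) (vis.add v) ((rest, f' + 1) :: S) hpush]
                rw [show dfsLoop graph goal allow_trees rev_idx grid (f' + 1) (v :: rest) vis =
                      (match dfsLoop graph goal allow_trees rev_idx grid f' (pvNbrs graph v) (vis.add v) with
                        | (true, vis') => (true, vis')
                        | (false, vis') => dfsLoop graph goal allow_trees rev_idx grid (f' + 1) rest vis') by
                    rw [dfsLoop.eq_def]; simp [hc, hsk]
                    rw [dfsVisit.eq_def]; simp [hg, PySem.Set.add, hc]]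
                rcases hp : dfsLoop graph goal allow_trees rev_idx grid f' (pvNbrs graph v) (vis.add v) with ⟨r, vis'⟩
                cases r with
                | true => simp
                | false =>
                  simp only
                  exact ih (f' + 1) rest vis' S (by simpa using htail)

lemma dfsVisit_succ (graph : List (Int × List Int)) (goal : Int) (allow_trees : Bool)
    (rev_idx : List (Int × Int × Int)) (grid : List (List String))
    (f' : Nat) (u : Int) (vis : PySem.Set Int) :
    dfsVisit graph goal allow_trees rev_idx grid (Nat.succ f') u vis =
      (if u == goal then (true, vis)
       else dfsLoop graph goal allow_trees rev_idx grid f' (pvNbrs graph u) (vis.add u)) := by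
  simp [dfsVisit]

theorem dfs_eq_alt (graph : List (Int × List Int)) (u : Int) (goal : Int) (visited : List Int)
    (allow_trees : Bool) (rev_idx : List (Int × Int × Int)) (grid : List (List String)) :
    dfs graph u goal visited allow_trees rev_idx grid =
      dfs_alt graph u goal visited allow_trees rev_idx grid := by
  unfold dfs dfs_alt pvFuel
  rw [show (graph.flatMap Prod.snd).length + 1 = Nat.succ (graph.flatMap Prod.snd).length from rfl]
  rw [dfsVisit_succ]
  by_cases hg : (u == goal) = true
  · simp [hg]
  · simp only [hg, Bool.false_eq_true, if_false]
    rw [machine_eq_loop graph goal allow_trees rev_idx grid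
      (pvStackM (pvFuel graph + 1) [(pvNbrs graph u, (graph.flatMap Prod.snd).length)])
      (graph.flatMap Prod.snd).length (pvNbrs graph u)
      ((PySem.Set.ofList visited).add u) [] (by unfold pvFuel; exact le_refl _)]
    rcases dfsLoop graph goal allow_trees rev_idx grid (graph.flatMap Prod.snd).length
      (pvNbrs graph u) ((PySem.Set.ofList visited).add u) with ⟨r, vis'⟩
    cases r <;> simp [dfsMachine]

-- ===== VERDICT (by name: the statement is the Claim_ definition above) =====
theorem dfs_spec : Claim_equal_dfs := by
  intro graph u goal visited allow_trees rev_idx grid _ _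
  exact dfs_eq_alt graph u goal visited allow_trees rev_idx grid
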